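-- pv_equiv track=rewrite | github.com/need-being/eink | draw_text.py | parse
-- ===== SOURCE A (Python) =====
-- def parse(text):
--     s = ['', '']
--     i = 0
--     for c in text:
--         if c == '*':
--             i = 1 - i
--         else:
--             s[i] += c
--             if c.isspace():
--                 s[1-i] += c
--             else:
--                 s[1-i] += ' '
--     return s[0], s[1]
-- ===== SOURCE B (Python) =====
-- def parse(text):
--     layer0 = []
--     layer1 = []
--     for k, seg in enumerate(text.split('*')):
--         active, other = (layer0, layer1) if k % 2 == 0 else (layer1, layer0)
--         for c in seg:
--             active.append(c)
--             other.append(c if c.isspace() else ' ')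
--     return ''.join(layer0), ''.join(layer1)
-- ===== Notes on version B (the rewrite author's own statement) =====
-- stated objective: alternative
-- what changed: B replaces A's in-loop toggle flag with an explicit segmentation: split the text on the asterisk separator, then process each segment with its enumerate index's parity selecting the active layer, accumulating into lists joined at the end.
import Mathlib
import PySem

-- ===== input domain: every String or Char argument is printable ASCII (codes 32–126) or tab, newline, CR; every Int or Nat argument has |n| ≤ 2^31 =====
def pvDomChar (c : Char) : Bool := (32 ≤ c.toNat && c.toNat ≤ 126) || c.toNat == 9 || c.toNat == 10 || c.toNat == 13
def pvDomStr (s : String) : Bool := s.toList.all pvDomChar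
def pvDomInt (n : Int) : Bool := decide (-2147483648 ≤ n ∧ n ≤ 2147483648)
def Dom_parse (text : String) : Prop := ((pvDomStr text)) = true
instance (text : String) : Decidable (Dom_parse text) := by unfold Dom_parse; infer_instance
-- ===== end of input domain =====

-- B replaces A's inline toggle with a split-on-'*' / enumerate-parity decomposition (objective: alternative, same cost).

-- ===== PORT A =====
-- A's loop body: toggle the active layer on '*', otherwise append the char to the
-- active layer and (the char if whitespace, else ' ') to the other layer.
def stepA (st : List Char × List Char × Int) (c : Char) : List Char × List Char × Int :=
  if c = '*' then (st.1, st.2.1, 1 - st.2.2)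
  else if st.2.2 = 0 then
    (st.1 ++ [c], st.2.1 ++ [if PySem.Chars.isspace c then c else ' '], st.2.2)
  else
    (st.1 ++ [if PySem.Chars.isspace c then c else ' '], st.2.1 ++ [c], st.2.2)

def parse (text : String) : String × String :=
  let st := text.toList.foldl stepA ([], [], 0)
  (String.ofList st.1, String.ofList st.2.1)

-- ===== PORT B =====
-- B's inner loop body: with k the segment index, append to the layer k % 2 points at.
def stepB (k : Int) (t : List Char × List Char) (c : Char) : List Char × List Char :=
  let d := if PySem.Chars.isspace c then c else ' '
  if PySem.Int.mod k 2 = 0 then (t.1 ++ [c], t.2 ++ [d]) else (t.1 ++ [d], t.2 ++ [c])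

def parse_alt (text : String) : String × String :=
  let segs := PySem.Chars.splitOn text.toList ['*']
  let st := (PySem.List.enumerate segs 0).foldl
    (fun st p => p.2.foldl (stepB p.1) st) (([], []) : List Char × List Char)
  (String.ofList st.1, String.ofList st.2)

-- ===== PRECONDITION & SPEC =====
def Spec_parse (text : String) (out : String × String) : Prop := out = parse_alt text
instance (text : String) (out : String × String) : Decidable (Spec_parse text out) := by unfold Spec_parse; infer_instance

-- ===== CLAIM (what is proved, stated in full; the proofs are below) =====
def Claim_equal_parse : Prop := ∀ (text : String), Dom_parse text → Spec_parse text (parse text)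

-- ===== LEMMAS AND PROOFS =====

-- Proof-side characterisation of PySem.Chars.splitOn with the single-char separator '*'.
def mySplit : List Char → List (List Char)
  | [] => [[]]
  | c :: cs =>
    match mySplit cs with
    | [] => [[]]
    | h :: t => if c = '*' then [] :: h :: t else (c :: h) :: t

theorem mySplit_eq_cons (l : List Char) : ∃ h t, mySplit l = h :: t := by
  induction l with
  | nil => exact ⟨[], [], rfl⟩
  | cons c cs ih =>
    obtain ⟨h, t, hh⟩ := ih
    by_cases hc : c = '*'
    · exact ⟨[], h :: t, by simp [mySplit, hh, hc]⟩
    · exact ⟨c :: h, t, by simp [mySplit, hh, hc]⟩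

theorem go_eq_mySplit : ∀ (l : List Char) (fuel : Nat) (cur : List Char) (acc : List (List Char)),
    l.length ≤ fuel →
    PySem.Chars.splitOn.go ['*'] fuel l cur acc
      = acc.reverse ++ (mySplit l).modifyHead (cur.reverse ++ ·) := by
  intro l
  induction l with
  | nil =>
    intro fuel cur acc _
    cases fuel <;> simp [PySem.Chars.splitOn.go, mySplit]
  | cons c rest ih =>
    intro fuel cur acc hle
    cases fuel with
    | zero => simp at hle
    | succ f =>
      obtain ⟨h, t, hh⟩ := mySplit_eq_cons rest
      have hfle : rest.length ≤ f := by simp at hle; omega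
      by_cases hc : c = '*'
      · subst hc
        have h1 : PySem.Chars.splitOn.go ['*'] (f+1) ('*' :: rest) cur acc
            = PySem.Chars.splitOn.go ['*'] f rest [] (cur.reverse :: acc) := by
          simp [PySem.Chars.splitOn.go, List.isPrefixOf]
        rw [h1, ih f [] (cur.reverse :: acc) hfle]
        simp [mySplit, hh]
      · have h1 : PySem.Chars.splitOn.go ['*'] (f+1) (c :: rest) cur acc
            = PySem.Chars.splitOn.go ['*'] f rest (c :: cur) acc := by
          simp [PySem.Chars.splitOn.go, List.isPrefixOf]
          intro h; exact absurd h.symm hc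
        rw [h1, ih f (c :: cur) acc hfle]
        simp [mySplit, hh, hc]

theorem splitOn_eq_mySplit (l : List Char) :
    PySem.Chars.splitOn l ['*'] = mySplit l := by
  have := go_eq_mySplit l (l.length + 1) [] [] (by omega)
  have hid : ∀ (L : List (List Char)), L.modifyHead (fun x => x) = L := by
    intro L; cases L <;> rfl
  simpa [PySem.Chars.splitOn, hid] using this

-- The outer fold of B, starting at segment index k.
def bOuter (segs : List (List Char)) (k : Int) (st : List Char × List Char) :
    List Char × List Char :=
  (PySem.List.enumerate segs k).foldl (fun st p => p.2.foldl (stepB p.1) st) st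

theorem bridge : ∀ (cs : List Char) (k : Int) (s0 s1 : List Char),
    ∃ j, List.foldl stepA (s0, s1, PySem.Int.mod k 2) cs
      = ((bOuter (mySplit cs) k (s0, s1)).1, (bOuter (mySplit cs) k (s0, s1)).2, j) := by
  intro cs
  induction cs with
  | nil =>
    intro k s0 s1
    exact ⟨PySem.Int.mod k 2,
      by simp [bOuter, mySplit, PySem.List.enumerate_cons, PySem.List.enumerate_nil]⟩
  | cons c rest ih =>
    intro k s0 s1
    obtain ⟨h, t, hh⟩ := mySplit_eq_cons rest
    by_cases hc : c = '*'
    · subst hc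
      have hstar : stepA (s0, s1, PySem.Int.mod k 2) '*' = (s0, s1, PySem.Int.mod (k + 1) 2) := by
        have h1 := PySem.Int.mod_eq_emod_of_pos (a := k) (b := 2) (by omega)
        have h2 := PySem.Int.mod_eq_emod_of_pos (a := k + 1) (b := 2) (by omega)
        simp [stepA, Prod.ext_iff]
        omega
      have hseg : mySplit ('*' :: rest) = [] :: h :: t := by simp [mySplit, hh]
      have hout : bOuter (mySplit ('*' :: rest)) k (s0, s1)
          = bOuter (mySplit rest) (k + 1) (s0, s1) := by
        simp [hseg, hh, bOuter, PySem.List.enumerate_cons]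
      obtain ⟨j, hj⟩ := ih (k + 1) s0 s1
      exact ⟨j, by rw [List.foldl_cons, hstar, hout]; exact hj⟩
    · have hseg : mySplit (c :: rest) = (c :: h) :: t := by simp [mySplit, hh, hc]
      have hstep : stepA (s0, s1, PySem.Int.mod k 2) c
          = ((stepB k (s0, s1) c).1, (stepB k (s0, s1) c).2, PySem.Int.mod k 2) := by
        simp only [stepA, stepB, if_neg hc]
        by_cases hk : PySem.Int.mod k 2 = 0
        · simp only [if_pos hk]
        · simp only [if_neg hk]
      have hout : bOuter (mySplit (c :: rest)) k (s0, s1)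
          = bOuter (mySplit rest) k (stepB k (s0, s1) c) := by
        simp [hseg, hh, bOuter, PySem.List.enumerate_cons]
      obtain ⟨j, hj⟩ := ih k (stepB k (s0, s1) c).1 (stepB k (s0, s1) c).2
      refine ⟨j, ?_⟩
      rw [List.foldl_cons, hstep, hout]
      simpa using hj

-- ===== VERDICT (by name: the statement is the Claim_ definition above) =====
theorem parse_spec : Claim_equal_parse := by
  intro text _
  unfold Spec_parse parse parse_alt
  obtain ⟨j, hj⟩ := bridge text.toList 0 [] []
  rw [splitOn_eq_mySplit]
  have h0 : PySem.Int.mod 0 2 = (0 : Int) := by decide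
  rw [h0] at hj
  simp only [hj, bOuter]
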